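-- pv_equiv track=rewrite | github.com/iReynaldo/secure_monitoring_service_pkg | secure_monitoring_service_pkg/simulation_engine/mvdp.py | target_asn_set_from_path_list
-- ===== SOURCE A (Python) =====
-- from collections import Counter
--
-- def target_asn_set_from_path_list(path_list, max_number_of_dishonest_nodes):
--     """
--     Returns a reduced list of target asns based on whether or not they
--     mininumally show up in 'max_number_of_dishonest_nodes' paths in
--     :param path_list:
--     :param max_number_of_dishonest_nodes:
--     :return:
--     """
--     asn_set = set()
--     asn_counter = Counter()
--     for path in path_list:
--         for asn in path:
--             # TODO: if there's a case where an ASN is added to the same path multiple times,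
--             # this doesn't account fo that. It assumes this kind of manipulation is not part of our
--             # simulations. Adding it is simple, but want to keep this as lean as possible.
--             asn_counter[asn] += 1
--             if asn_counter[asn] > max_number_of_dishonest_nodes:
--                 asn_set.add(asn)
--     return asn_set
-- ===== SOURCE B (Python) =====
-- def target_asn_set_from_path_list(path_list, max_number_of_dishonest_nodes):
--     """Sort the flattened paths so equal ASNs form contiguous runs, then scan the
--     runs once and keep the value of every run longer than the threshold."""
--     flat = sorted(asn for path in path_list for asn in path)
--     targets = set()
--     i, n = 0, len(flat)
--     while i < n:
--         j = i
--         while j < n and flat[j] == flat[i]: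
--             j += 1
--         if j - i > max_number_of_dishonest_nodes:
--             targets.add(flat[i])
--         i = j
--     return targets
-- ===== Notes on version B (the rewrite author's own statement) =====
-- stated objective: alternative
-- what changed: B flattens the paths, SORTS the stream so equal ASNs form contiguous runs, and collects the value of every run longer than the threshold with a two-pointer scan, instead of A's nested loops over a hash Counter that add to the set each time a running count exceeds the threshold.
import Mathlib
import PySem

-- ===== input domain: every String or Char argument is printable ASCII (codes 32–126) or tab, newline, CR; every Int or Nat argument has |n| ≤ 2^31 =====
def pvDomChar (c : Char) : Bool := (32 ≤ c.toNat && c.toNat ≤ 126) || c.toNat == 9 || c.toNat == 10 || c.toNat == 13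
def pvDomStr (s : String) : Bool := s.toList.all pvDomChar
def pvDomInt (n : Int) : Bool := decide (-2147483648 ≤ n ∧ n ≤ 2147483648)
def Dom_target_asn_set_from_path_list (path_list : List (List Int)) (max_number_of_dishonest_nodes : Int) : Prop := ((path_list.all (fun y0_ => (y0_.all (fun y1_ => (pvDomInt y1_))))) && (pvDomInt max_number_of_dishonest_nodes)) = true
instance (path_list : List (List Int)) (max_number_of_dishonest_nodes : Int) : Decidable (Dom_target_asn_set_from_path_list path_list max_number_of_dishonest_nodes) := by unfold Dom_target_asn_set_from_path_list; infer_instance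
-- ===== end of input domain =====

-- B sorts the flattened path stream so equal ASNs form contiguous runs and collects the value of
-- every run longer than the threshold in one scan, instead of A's hash-counter pass ('alternative').
-- Both Pythons return a SET; a Python set's iteration order is not modelled (see PYSEM.md), so each
-- port returns its set through the order-insensitive canonical representative sorted(·); outputs are
-- compared as finite sets.

-- ===== PORT A =====
-- one step of A's inner loop: asn_counter[asn] += 1; if asn_counter[asn] > max_…: asn_set.add(asn)
def pvAStep (max_number_of_dishonest_nodes : Int)
    (st : PySem.Set Int × PySem.Dict Int Int) (asn : Int) :
    PySem.Set Int × PySem.Dict Int Int :=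
  let cnt := st.2.modify asn 0 (· + 1)
  if cnt.getD asn 0 > max_number_of_dishonest_nodes then (PySem.Set.add st.1 asn, cnt)
  else (st.1, cnt)

def target_asn_set_from_path_list (path_list : List (List Int)) (max_number_of_dishonest_nodes : Int) : List Int :=
  let st := path_list.foldl
    (fun st path => path.foldl (pvAStep max_number_of_dishonest_nodes) st)
    (PySem.Set.empty, PySem.Dict.empty)
  -- the returned Python set, by its canonical sorted representative (iteration order unmodelled)
  PySem.List.sorted st.1 (fun x => x) false

-- ===== PORT B =====
-- B's two-pointer run scan over the sorted stream: the inner 'while j < n and flat[j] == flat[i]'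
-- is the takeWhile/dropWhile split at the head; j - i is the run length.
def pvRunScan (max_number_of_dishonest_nodes : Int) (targets : PySem.Set Int) :
    List Int → PySem.Set Int
  | [] => targets
  | x :: xs =>
      let run := xs.takeWhile (fun y => y == x)
      let rest := xs.dropWhile (fun y => y == x)
      pvRunScan max_number_of_dishonest_nodes
        (if ((run.length : Int) + 1) > max_number_of_dishonest_nodes
         then PySem.Set.add targets x else targets) rest
  termination_by l => l.length
  decreasing_by exact Nat.lt_succ_of_le (List.length_dropWhile_le _ _)

def target_asn_set_from_path_list_alt (path_list : List (List Int)) (max_number_of_dishonest_nodes : Int) : List Int :=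
  let flat := path_list.flatMap id
  pvRunScan max_number_of_dishonest_nodes PySem.Set.empty
    (PySem.List.sorted flat (fun x => x) false)

-- ===== PRECONDITION & SPEC =====
def Spec_target_asn_set_from_path_list (path_list : List (List Int)) (max_number_of_dishonest_nodes : Int) (out : List Int) : Prop := out = target_asn_set_from_path_list_alt path_list max_number_of_dishonest_nodes
instance (path_list : List (List Int)) (max_number_of_dishonest_nodes : Int) (out : List Int) : Decidable (Spec_target_asn_set_from_path_list path_list max_number_of_dishonest_nodes out) := by unfold Spec_target_asn_set_from_path_list; infer_instance

-- ===== CLAIM (what is proved, stated in full; the proofs are below) =====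
def Claim_equal_target_asn_set_from_path_list : Prop := ∀ (path_list : List (List Int)) (max_number_of_dishonest_nodes : Int), Dom_target_asn_set_from_path_list path_list max_number_of_dishonest_nodes → Spec_target_asn_set_from_path_list path_list max_number_of_dishonest_nodes (target_asn_set_from_path_list path_list max_number_of_dishonest_nodes)

-- ===== LEMMAS AND PROOFS =====

-- the invariant of A's counting loop after processing the stream prefix `pre`
def pvInvA (t : Int) (pre : List Int) (st : PySem.Set Int × PySem.Dict Int Int) : Prop :=
  (∀ a, st.2.getD a 0 = (pre.count a : Int)) ∧
  (∀ a, a ∈ st.1 ↔ a ∈ pre ∧ (pre.count a : Int) > t) ∧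
  st.1.Nodup

lemma pvInvA_step (t : Int) (pre : List Int) (st : PySem.Set Int × PySem.Dict Int Int)
    (asn : Int) (h : pvInvA t pre st) : pvInvA t (pre ++ [asn]) (pvAStep t st asn) := by
  obtain ⟨hc, hm, hnd⟩ := h
  have hcnt : ∀ a, ((pre ++ [asn]).count a : Int) =
      if a = asn then (pre.count a : Int) + 1 else (pre.count a : Int) := by
    intro a
    by_cases ha : a = asn
    · subst ha; simp [List.count_append]
    · rw [if_neg ha, List.count_append,
        List.count_eq_zero.mpr (show a ∉ [asn] by simpa using ha)]
      simp
  simp only [pvAStep, PySem.Dict.getD_modify_self, hc asn]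
  by_cases hgt : (pre.count asn : Int) + 1 > t
  · rw [if_pos hgt]
    refine ⟨?_, ?_, PySem.Set.nodup_add st.1 asn hnd⟩
    · intro a
      rw [PySem.Dict.getD_modify, hcnt a]
      split_ifs with ha <;> simp [ha, hc]
    · intro a
      rw [PySem.Set.mem_add, hcnt a, hm a]
      by_cases ha : a = asn
      · subst ha; simp [hgt]
      · simp [ha]
  · rw [if_neg hgt]
    refine ⟨?_, ?_, hnd⟩
    · intro a
      rw [PySem.Dict.getD_modify, hcnt a]
      split_ifs with ha <;> simp [ha, hc]
    · intro a
      rw [hcnt a, hm a]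
      by_cases ha : a = asn
      · subst ha
        constructor
        · rintro ⟨-, hgt'⟩; omega
        · rintro ⟨-, hgt'⟩; omega
      · simp [ha]

lemma pvInvA_foldl (t : Int) (l pre : List Int) (st : PySem.Set Int × PySem.Dict Int Int)
    (h : pvInvA t pre st) : pvInvA t (pre ++ l) (l.foldl (pvAStep t) st) := by
  induction l generalizing pre st with
  | nil => simpa using h
  | cons x xs ih =>
      have h2 := ih (pre ++ [x]) _ (pvInvA_step t pre st x h)
      simpa using h2

-- B's run scan: on a nondecreasing list, with an accumulator strictly below every element,
-- the result is strictly increasing and holds exactly the accumulator together with the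
-- values occurring more than t times.
lemma pvRunScan_char (t : Int) : ∀ (n : Nat) (l : List Int) (targets : PySem.Set Int),
    l.length ≤ n → l.Pairwise (· ≤ ·) → targets.Pairwise (· < ·) →
    (∀ y ∈ targets, ∀ z ∈ l, y < z) →
    (pvRunScan t targets l).Pairwise (· < ·) ∧
    (∀ a, a ∈ pvRunScan t targets l ↔ a ∈ targets ∨ (a ∈ l ∧ (l.count a : Int) > t)) := by
  intro n
  induction n with
  | zero =>
      intro l targets hlen _ hp _
      have hl : l = [] := List.eq_nil_of_length_eq_zero (Nat.le_zero.mp hlen)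
      subst hl
      simp [pvRunScan, hp]
  | succ n ih =>
      intro l targets hlen hsorted hp hbelow
      cases l with
      | nil => simp [pvRunScan, hp]
      | cons x xs =>
          have hxle : ∀ z ∈ xs, x ≤ z := (List.pairwise_cons.mp hsorted).1
          have hxs_sorted : xs.Pairwise (· ≤ ·) := (List.pairwise_cons.mp hsorted).2
          have hsplit : xs.takeWhile (fun y => y == x) ++ xs.dropWhile (fun y => y == x) = xs :=
            List.takeWhile_append_dropWhile
          have hrun_eq : ∀ z ∈ xs.takeWhile (fun y => y == x), z = x := by
            intro z hz
            have := List.mem_takeWhile_imp hz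
            simpa using this
          have hrest_sorted : (xs.dropWhile (fun y => y == x)).Pairwise (· ≤ ·) :=
            List.Pairwise.sublist (List.dropWhile_sublist _) hxs_sorted
          have hrest_gt : ∀ z ∈ xs.dropWhile (fun y => y == x), x < z := by
            intro z hz
            cases hR : xs.dropWhile (fun y => y == x) with
            | nil => rw [hR] at hz; exact absurd hz (List.not_mem_nil)
            | cons r rs =>
                have hne : xs.dropWhile (fun y => y == x) ≠ [] := by simp [hR]
                have hhead := List.head_dropWhile_not (fun y => y == x) hne
                simp only [hR, List.head_cons] at hhead
                have hrne : r ≠ x := by simpa using hhead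
                have hrxs : r ∈ xs := by
                  rw [← hsplit, hR]; exact List.mem_append_right _ List.mem_cons_self
                have hxr : x < r := lt_of_le_of_ne (hxle r hrxs) (Ne.symm hrne)
                rw [hR] at hz
                rcases List.mem_cons.mp hz with hz | hz
                · exact hz ▸ hxr
                · have := (List.pairwise_cons.mp (hR ▸ hrest_sorted)).1 z hz
                  exact lt_of_lt_of_le hxr this
          have hxnotrest : x ∉ xs.dropWhile (fun y => y == x) := fun h =>
            lt_irrefl x (hrest_gt x h)
          have hcount_run : (xs.takeWhile (fun y => y == x)).count x =
              (xs.takeWhile (fun y => y == x)).length := by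
            rw [List.count_eq_length]
            intro b hb
            first
            | exact hrun_eq b hb
            | exact (hrun_eq b hb).symm
          have hcount_x : ((x :: xs).count x : Int) =
              ((xs.takeWhile (fun y => y == x)).length : Int) + 1 := by
            have hxs2 : xs.count x = (xs.takeWhile (fun y => y == x)).length := by
              conv_lhs => rw [← hsplit]
              rw [List.count_append, hcount_run, List.count_eq_zero.mpr hxnotrest]
              simp
            rw [List.count_cons_self, hxs2]
            push_cast; ring
          have hcount_ne : ∀ a, a ≠ x → ((x :: xs).count a : Int) =
              ((xs.dropWhile (fun y => y == x)).count a : Int) := by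
            intro a ha
            have hxs2 : xs.count a = (xs.dropWhile (fun y => y == x)).count a := by
              conv_lhs => rw [← hsplit]
              rw [List.count_append,
                List.count_eq_zero.mpr (fun h => ha (hrun_eq a h))]
              simp
            have hcons : (x :: xs).count a = xs.count a := by
              simp [Ne.symm ha]
            rw [hcons, hxs2]
          have hmem_ne : ∀ a, a ≠ x → (a ∈ x :: xs ↔ a ∈ xs.dropWhile (fun y => y == x)) := by
            intro a ha
            constructor
            · intro h
              rcases List.mem_cons.mp h with h | h
              · exact absurd h ha
              · rw [← hsplit] at h
                rcases List.mem_append.mp h with h | h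
                · exact absurd (hrun_eq a h) ha
                · exact h
            · intro h
              rw [← hsplit]
              exact List.mem_cons_of_mem _ (List.mem_append_right _ h)
          have hxnott : x ∉ targets := fun h => lt_irrefl x (hbelow x h x List.mem_cons_self)
          -- the updated accumulator
          set t' := (if ((xs.takeWhile (fun y => y == x)).length : Int) + 1 > t
              then PySem.Set.add targets x else targets) with ht'
          have hmt' : ∀ a, a ∈ t' ↔ a ∈ targets ∨
              (a = x ∧ ((xs.takeWhile (fun y => y == x)).length : Int) + 1 > t) := by
            intro a
            rw [ht']
            split_ifs with hcond
            · rw [PySem.Set.mem_add]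
              constructor
              · rintro (h | h)
                · exact Or.inl h
                · exact Or.inr ⟨h, hcond⟩
              · rintro (h | ⟨h, -⟩)
                · exact Or.inl h
                · exact Or.inr h
            · constructor
              · exact Or.inl
              · rintro (h | ⟨-, h⟩)
                · exact h
                · exact absurd h hcond
          have hpt' : t'.Pairwise (· < ·) := by
            rw [ht']
            split_ifs with hcond
            · rw [PySem.Set.add_of_not_mem hxnott]
              refine List.pairwise_append.mpr ⟨hp, List.pairwise_singleton _ _, ?_⟩
              intro y hy z hz
              rw [List.mem_singleton] at hz
              exact hz ▸ hbelow y hy x List.mem_cons_self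
            · exact hp
          have hbt' : ∀ y ∈ t', ∀ z ∈ xs.dropWhile (fun y => y == x), y < z := by
            intro y hy z hz
            rcases (hmt' y).mp hy with h | ⟨h, -⟩
            · refine hbelow y h z ?_
              rw [← hsplit]
              exact List.mem_cons_of_mem _ (List.mem_append_right _ hz)
            · exact h ▸ hrest_gt z hz
          have hlenrest : (xs.dropWhile (fun y => y == x)).length ≤ n := by
            have h1 := List.length_dropWhile_le (fun y => y == x) xs
            have h2 : xs.length + 1 ≤ n + 1 := by simpa using hlen
            omega
          obtain ⟨ihp, ihm⟩ := ih (xs.dropWhile (fun y => y == x)) t' hlenrest hrest_sorted hpt' hbt'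
          have hunfold : pvRunScan t targets (x :: xs) =
              pvRunScan t t' (xs.dropWhile (fun y => y == x)) := by
            rw [pvRunScan]
          constructor
          · rw [hunfold]; exact ihp
          · intro a
            rw [hunfold, ihm a, hmt' a]
            by_cases ha : a = x
            · subst ha
              simp only [hxnotrest, false_and, or_false, hcount_x]
              constructor
              · rintro (h | ⟨-, h⟩)
                · exact Or.inl h
                · exact Or.inr ⟨by simp, h⟩
              · rintro (h | ⟨-, h⟩)
                · exact Or.inl h
                · exact Or.inr ⟨by simp, h⟩
            · simp only [ha, false_and, or_false]
              rw [hmem_ne a ha, hcount_ne a ha]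

-- ===== VERDICT (by name: the statement is the Claim_ definition above) =====
theorem target_asn_set_from_path_list_spec : Claim_equal_target_asn_set_from_path_list := by
  intro path_list m _
  unfold Spec_target_asn_set_from_path_list
  unfold target_asn_set_from_path_list target_asn_set_from_path_list_alt
  set flat := path_list.flatMap id with hflat
  -- A's nested loop is the fold over the flattened stream
  have hA : path_list.foldl (fun st path => path.foldl (pvAStep m) st)
      (PySem.Set.empty, PySem.Dict.empty) = flat.foldl (pvAStep m)
      (PySem.Set.empty, PySem.Dict.empty) := by
    rw [hflat, List.flatMap_id, List.foldl_flatten]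
  have hinvA : pvInvA m flat (flat.foldl (pvAStep m) (PySem.Set.empty, PySem.Dict.empty)) := by
    have h0 : pvInvA m [] (PySem.Set.empty, PySem.Dict.empty) := by
      refine ⟨fun a => rfl, fun a => ?_, List.nodup_nil⟩
      simp [PySem.Set.empty]
    simpa using pvInvA_foldl m flat [] _ h0
  obtain ⟨-, hmemA, hndA⟩ := hinvA
  set sA := (flat.foldl (pvAStep m) (PySem.Set.empty, PySem.Dict.empty)).1 with hsA
  -- B's scan runs over the sorted stream
  set sflat := PySem.List.sorted flat (fun x => x) false with hsflat
  have hperm : sflat.Perm flat := PySem.List.sorted_perm flat (fun x => x) false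
  have hsorted : sflat.Pairwise (· ≤ ·) := PySem.List.sorted_pairwise flat (fun x => x)
  obtain ⟨hpB, hmB⟩ := pvRunScan_char m sflat.length sflat PySem.Set.empty le_rfl hsorted
    List.Pairwise.nil (fun y hy => absurd hy (List.not_mem_nil))
  set sB := pvRunScan m PySem.Set.empty sflat with hsB
  have hmemB : ∀ a, a ∈ sB ↔ a ∈ flat ∧ (flat.count a : Int) > m := by
    intro a
    rw [hsB, hmB a]
    simp only [PySem.Set.empty, List.not_mem_nil, false_or]
    rw [hperm.mem_iff, hperm.count_eq]
  have hndB : sB.Nodup := hpB.imp (fun h => ne_of_lt h)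
  have hpermAB : sB.Perm sA := by
    rw [List.perm_ext_iff_of_nodup hndB hndA]
    intro a
    rw [hmemB a, hmemA a]
  show PySem.List.sorted (path_list.foldl (fun st path => path.foldl (pvAStep m) st)
      (PySem.Set.empty, PySem.Dict.empty)).1 (fun x => x) false = sB
  rw [hA]
  exact PySem.List.sorted_id_eq_of_perm_of_pairwise _ _ hpermAB
    (hpB.imp (fun h => le_of_lt h))
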